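-- pv_equiv track=rewrite | github.com/valmenucerri/voyageur_de_commerce | Programme_graphe_incomplet/tracer_lien_2.py | petit_noeud
-- ===== SOURCE A (Python) =====
-- from copy import deepcopy
--
-- def petit_noeud(L,N):
--     '''
--     Trouver le noeud qui possède le minimum d'arêtes dans le graphe
--     :param L: la liste représentant le graphe . type : list
--     :param N: la dimension du graphe, son nombre total de noeud. type : int
--     :return: petit_noeud: l'indice du noeud ayant le moins d'arête. type : int
--     '''
--     noeud = [] #créer une liste contenant le nombre d'arête par noeud
--     l_neuf = deepcopy(L) #copier la liste de liste pour ne pas la modifier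
--     for i,j in enumerate(l_neuf):
--         if j == []:
--             l_neuf[i] = [1 for _ in range(N)] #ajouter une liste de taille N, pour éviter que la liste vide sot considérée comme le noeud avec le moins d'arêtes
--             noeud.append(N)
--         else:
--             noeud.append(len(j))
--     petit = min(noeud)
--     petit_noeud = noeud.index(petit)
--     return petit_noeud
-- ===== SOURCE B (Python) =====
-- def petit_noeud(L, N):
--     '''
--     Index of the node with the fewest edges; an empty adjacency list counts
--     as weight N.  Stable-sorts the node indices by weight and takes the head:
--     stability makes the head the FIRST index achieving the minimum, which is
--     exactly A's noeud.index(min(noeud)) tie-break.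
--     '''
--     order = sorted(range(len(L)), key=lambda i: N if L[i] == [] else len(L[i]))
--     return order[0]
-- ===== Notes on version B (the rewrite author's own statement) =====
-- stated objective: alternative
-- what changed: Replaces A's deepcopy + building a per-node weight list + separate min() and list.index() passes by stable-sorting the node indices by their weight and returning the head of the sorted order (stability gives A's first-minimum tie-break).
import Mathlib
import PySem

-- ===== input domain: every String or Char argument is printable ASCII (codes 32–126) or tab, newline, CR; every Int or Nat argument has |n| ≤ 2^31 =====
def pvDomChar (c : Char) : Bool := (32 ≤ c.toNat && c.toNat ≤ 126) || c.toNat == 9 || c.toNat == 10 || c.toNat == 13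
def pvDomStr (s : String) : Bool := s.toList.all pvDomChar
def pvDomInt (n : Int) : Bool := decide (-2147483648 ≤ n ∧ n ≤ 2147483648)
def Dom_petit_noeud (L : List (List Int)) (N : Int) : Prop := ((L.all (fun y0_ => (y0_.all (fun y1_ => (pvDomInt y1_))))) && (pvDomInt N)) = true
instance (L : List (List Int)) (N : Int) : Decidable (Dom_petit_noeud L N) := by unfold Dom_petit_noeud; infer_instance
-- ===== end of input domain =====

-- B replaces A's deepcopy + weight-list build + min()/index() scans by stable-sorting the node indices by weight and taking the head (alternative decomposition, same result).


-- ===== PORT A =====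
-- literal port of A: build 'noeud' (one weight per node, N for an empty adjacency list),
-- then petit = min(noeud), then noeud.index(petit).  The deepcopy and the write of
-- [1]*N into l_neuf are pure mutation that is never read afterwards, so they contribute
-- nothing to the return value and have no Lean counterpart (return value only).
def petit_noeud (L : List (List Int)) (N : Int) : Int :=
  let noeud : List Int :=
    L.foldl (fun acc j => if j = [] then acc ++ [N] else acc ++ [(j.length : Int)]) []
  match PySem.List.min? noeud (fun x => x) with
  | some petit =>
      match PySem.List.index? noeud petit with
      | some k => (k : Int)
      | none => 0        -- unreachable: petit ∈ noeud
  | none => 0            -- min([]) raises in Python: excluded by Pre_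

-- ===== PORT B =====
-- literal port of Source B: sorted(range(len(L)), key=lambda i: N if L[i] == [] else len(L[i]))[0]
def petit_noeud_alt (L : List (List Int)) (N : Int) : Int :=
  let order := PySem.List.sorted (PySem.List.pyRange 0 (L.length : Int) 1)
      (fun i => if PySem.List.pyGetD L i [] = [] then N else ((PySem.List.pyGetD L i []).length : Int))
  match order with
  | m :: _ => m
  | [] => 0            -- order[0] raises IndexError in Python: excluded by Pre_

-- ===== PRECONDITION & SPEC =====
-- Pre_ excludes only L = [], on which A raises ValueError (min of an empty list); B raises there too (IndexError).
def Pre_petit_noeud (L : List (List Int)) (N : Int) : Prop := L ≠ []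
instance (L : List (List Int)) (N : Int) : Decidable (Pre_petit_noeud L N) := by unfold Pre_petit_noeud; infer_instance
def pvWitness_petit_noeud : List (List Int) × Int := ([[1], [], [2, 3]], 4)
def Spec_petit_noeud (L : List (List Int)) (N : Int) (out : Int) : Prop := out = petit_noeud_alt L N
instance (L : List (List Int)) (N : Int) (out : Int) : Decidable (Spec_petit_noeud L N out) := by unfold Spec_petit_noeud; infer_instance

-- ===== CLAIM (what is proved, stated in full; the proofs are below) =====
def Claim_equal_petit_noeud : Prop := ∀ (L : List (List Int)) (N : Int), Dom_petit_noeud L N → Pre_petit_noeud L N → Spec_petit_noeud L N (petit_noeud L N)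

-- ===== LEMMAS AND PROOFS =====

-- the per-node weight both programs use
def pvG (N : Int) (j : List Int) : Int := if j = [] then N else (j.length : Int)

-- Head of the stable insertion sort splits the input: everything before it in the
-- ORIGINAL list has a strictly larger key (stability: the head is the FIRST minimum).
theorem pv_sorted_head_first {α κ : Type} [LinearOrder κ] (xs : List α) (key : α → κ) :
    ∀ (m : α) (t : List α), PySem.List.sorted xs key = m :: t →
      ∃ pre suf, xs = pre ++ m :: suf ∧ ∀ y ∈ pre, key m < key y := by
  induction xs using List.reverseRecOn with
  | nil =>
      intro m t h
      rw [(PySem.List.sorted_eq_nil_iff ([] : List α) key false).mpr rfl] at h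
      exact absurd h (by simp)
  | append_singleton ys x ih =>
      intro m t h
      have hfold : PySem.List.sorted (ys ++ [x]) key =
          PySem.List.insertBy (fun a b => decide (key a < key b)) x (PySem.List.sorted ys key) := by
        rw [PySem.List.sorted_eq_foldl_insertBy, PySem.List.sorted_eq_foldl_insertBy,
          List.foldl_append]
        rfl
      cases hys : PySem.List.sorted ys key with
      | nil =>
          have hysnil : ys = [] := (PySem.List.sorted_eq_nil_iff ys key false).mp hys
          rw [hfold, hys] at h
          simp only [PySem.List.insertBy, List.cons.injEq] at h
          exact ⟨[], [], by simp [hysnil, h.1], by simp⟩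
      | cons h₀ t₀ =>
          rw [hfold, hys] at h
          by_cases hlt : key x < key h₀
          · simp only [PySem.List.insertBy, hlt, decide_true, if_true, List.cons.injEq] at h
            obtain ⟨rfl, -⟩ := h
            refine ⟨ys, [], by simp, ?_⟩
            intro y hy
            exact lt_of_lt_of_le hlt (PySem.List.key_head_sorted_le ys key hys y hy)
          · simp only [PySem.List.insertBy, hlt, decide_false] at h
            obtain ⟨rfl, -⟩ := h
            obtain ⟨pre, suf, hsplit, hstrict⟩ := ih m t₀ hys
            exact ⟨pre, suf ++ [x], by simp [hsplit], hstrict⟩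

-- characterisation of B's result: the first index whose weight is minimal
theorem pv_alt_char (L : List (List Int)) (N : Int) (hL : L ≠ []) :
    ∃ p : Nat, p < L.length ∧ petit_noeud_alt L N = (p : Int) ∧
      (∀ j : Nat, j < L.length → pvG N (L.getD p []) ≤ pvG N (L.getD j [])) ∧
      (∀ j : Nat, j < p → pvG N (L.getD p []) < pvG N (L.getD j [])) := by
  set key : Int → Int :=
    fun i => if PySem.List.pyGetD L i [] = [] then N else ((PySem.List.pyGetD L i []).length : Int) with hkey
  have hkeyg : ∀ j : Nat, key (j : Int) = pvG N (L.getD j []) := by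
    intro j
    simp only [hkey, PySem.List.pyGetD_natCast, pvG]
  have hne : PySem.List.pyRange 0 (L.length : Int) 1 ≠ [] := by
    have : (0 : Int) ∈ PySem.List.pyRange 0 (L.length : Int) 1 := by
      rw [PySem.List.mem_pyRange_one]
      constructor
      · rfl
      · exact_mod_cast List.length_pos_iff.mpr hL
    intro h; rw [h] at this; simp at this
  obtain ⟨m, t, hm⟩ : ∃ m t,
      PySem.List.sorted (PySem.List.pyRange 0 (L.length : Int) 1) key = m :: t := by
    cases hs : PySem.List.sorted (PySem.List.pyRange 0 (L.length : Int) 1) key with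
    | nil => exact absurd ((PySem.List.sorted_eq_nil_iff _ _ _).mp hs) hne
    | cons m t => exact ⟨m, t, rfl⟩
  have hmem : m ∈ PySem.List.pyRange 0 (L.length : Int) 1 := by
    have : m ∈ PySem.List.sorted (PySem.List.pyRange 0 (L.length : Int) 1) key := by
      rw [hm]; simp
    rwa [PySem.List.mem_sorted] at this
  rw [PySem.List.mem_pyRange_one] at hmem
  obtain ⟨p, hp⟩ : ∃ p : Nat, m = (p : Int) := ⟨m.toNat, (Int.toNat_of_nonneg hmem.1).symm⟩
  subst hp
  have hplen : p < L.length := by exact_mod_cast hmem.2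
  have hisMin := PySem.List.key_head_sorted_le _ key hm
  obtain ⟨pre, suf, hsplit, hstrict⟩ := pv_sorted_head_first _ key _ _ hm
  -- pre.length = p : the range element at position pre.length is 0 + pre.length
  have hprelen : pre.length = p := by
    have hlt : pre.length < (PySem.List.pyRange 0 (L.length : Int) 1).length := by
      rw [hsplit]; simp
    have h1 := PySem.List.getElem_pyRange_one 0 (L.length : Int) pre.length hlt
    have h2 := List.getElem_of_eq hsplit hlt
    rw [h1] at h2
    simp only [List.getElem_append_right (le_refl pre.length), Nat.sub_self,
      List.getElem_cons_zero] at h2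
    have : (0 : Int) + pre.length = (p : Int) := h2
    omega
  refine ⟨p, hplen, ?_, ?_, ?_⟩
  · simp only [petit_noeud_alt]
    rw [← hkey, hm]
  · intro j hj
    have hjmem : (j : Int) ∈ PySem.List.pyRange 0 (L.length : Int) 1 := by
      rw [PySem.List.mem_pyRange_one]
      exact ⟨by positivity, by exact_mod_cast hj⟩
    have := hisMin (j : Int) hjmem
    rwa [hkeyg, hkeyg] at this
  · intro j hj
    have hjpre : (j : Int) ∈ pre := by
      have hjlt : j < pre.length := hprelen ▸ hj
      have hlt : j < (PySem.List.pyRange 0 (L.length : Int) 1).length := by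
        rw [hsplit]; simp; omega
      have hg := PySem.List.getElem_pyRange_one 0 (L.length : Int) j hlt
      have h2 := List.getElem_of_eq hsplit hlt
      rw [hg, List.getElem_append_left hjlt] at h2
      have : pre[j] = (j : Int) := by rw [← h2]; ring
      exact this ▸ List.getElem_mem hjlt
    have := hstrict (j : Int) hjpre
    rwa [hkeyg, hkeyg] at this

-- ===== VERDICT (by name: the statement is the Claim_ definition above) =====
theorem petit_noeud_spec : Claim_equal_petit_noeud := by
  intro L N _ hL
  unfold Spec_petit_noeud
  obtain ⟨p, hplen, halt, hmin, hfirst⟩ := pv_alt_char L N hL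
  -- A's weight list is the map of pvG over L
  have hnoeud :
      L.foldl (fun acc j => if j = [] then acc ++ [N] else acc ++ [(j.length : Int)]) []
        = L.map (pvG N) := by
    have hcong :
        L.foldl (fun acc j => if j = [] then acc ++ [N] else acc ++ [(j.length : Int)]) []
          = L.foldl (fun acc j => acc ++ [pvG N j]) [] := by
      apply PySem.List.foldl_congr_mem
      intro acc j _
      by_cases h : j = [] <;> simp [pvG, h]
    rw [hcong, PySem.List.foldl_append_singleton_eq_map]
    simp
  set M : List Int := L.map (pvG N) with hM
  have hMlen : M.length = L.length := by simp [hM]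
  have hMget : ∀ j : Nat, (hj : j < L.length) → M[j]'(by omega) = pvG N (L.getD j []) := by
    intro j hj
    simp only [hM, List.getElem_map, List.getD_eq_getElem L [] hj]
  have hMne : M ≠ [] := by
    simp only [hM, ne_eq, List.map_eq_nil_iff]; exact hL
  obtain ⟨v, hv⟩ : ∃ v, PySem.List.min? M (fun x => x) = some v := by
    cases hmin' : PySem.List.min? M (fun x => x) with
    | none => exact absurd ((PySem.List.min?_eq_none_iff _ _).mp hmin') hMne
    | some v => exact ⟨v, rfl⟩
  have hvmem := PySem.List.min?_mem hv
  have hvisMin := PySem.List.min?_isMin hv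
  have hplenM : p < M.length := by omega
  -- the minimum value equals the weight at B's index p
  have hveq : v = M[p]'hplenM := by
    have h1 : v ≤ M[p]'hplenM := hvisMin _ (List.getElem_mem hplenM)
    have h2 : M[p]'hplenM ≤ v := by
      obtain ⟨q, hq, hqv⟩ := List.mem_iff_getElem.mp hvmem
      rw [← hqv, hMget p hplen, hMget q (by omega)]
      exact hmin q (by omega)
    omega
  -- index? finds exactly p: weights before p are strictly larger
  have hidx : PySem.List.index? M v = some p := by
    refine (PySem.List.index?_eq_some_iff M v p).mpr ⟨M.take p, M.drop (p + 1), ?_, ?_, ?_⟩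
    · rw [hveq, List.getElem_cons_drop hplenM, List.take_append_drop]
    · simp [List.length_take]; omega
    · intro hvtake
      obtain ⟨j, hj, hjv⟩ := List.mem_iff_getElem.mp hvtake
      have hjp : j < p := by have := hj; simp [List.length_take] at this; omega
      rw [List.getElem_take] at hjv
      have hlt := hfirst j hjp
      rw [← hMget p hplen, ← hMget j (by omega), ← hveq] at hlt
      omega
  simp only [petit_noeud, hnoeud, hv, hidx, halt]
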